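-- pv_equiv track=rewrite | github.com/3E18YM/Blender-Confing_4.2 | scripts/addons/Synced Modifiers/__init__.py | do_props
-- ===== SOURCE A (Python) =====
-- array_props={'MIRROR_use_axis':3,'MIRROR_use_bisect_axis':3,'MIRROR_use_bisect_flip_axis':3,'ARRAY_constant_offset_displace':3,'ARRAY_relative_offset_displace':3,'SIMPLE_DEFORM_limits':2,'NORMAL_EDIT_offset':3,'UV_WARP_center':2,'UV_WARP_offset':2,'UV_WARP_scale':2,'HOOK_center':2}
--
-- def do_props(props,mod_type):
--     props_present=[prop for prop in [a.replace(mod_type+"_","") for a in array_props.keys()] if prop in props]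
--     array=props
--     for p in props_present:
--         pos = array.index(p)
--         array=props[:pos]
--         rem_array=props[pos+1:]
--         for i in range(0,array_props[mod_type+"_"+p]):
--             array.append(f'{p}[{i}]')
--         array = array + rem_array
--         props=array
--     return array
-- ===== SOURCE B (Python) =====
-- array_props={'MIRROR_use_axis':3,'MIRROR_use_bisect_axis':3,'MIRROR_use_bisect_flip_axis':3,'ARRAY_constant_offset_displace':3,'ARRAY_relative_offset_displace':3,'SIMPLE_DEFORM_limits':2,'NORMAL_EDIT_offset':3,'UV_WARP_center':2,'UV_WARP_offset':2,'UV_WARP_scale':2,'HOOK_center':2}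
--
-- def do_props(props, mod_type):
--     # one lookup table: stripped name -> index count (same reconstruction lookup as the original)
--     expand = {}
--     for key in array_props:
--         p = key.replace(mod_type + "_", "")
--         if p in props:
--             expand[p] = array_props[mod_type + "_" + p]
--     # single left-to-right pass; only the first occurrence of each expandable prop is expanded
--     seen = set()
--     out = []
--     for item in props:
--         if item in expand and item not in seen:
--             seen.add(item)
--             out += [f'{item}[{i}]' for i in range(expand[item])]
--         else:
--             out.append(item)
--     return out
-- ===== Notes on version B (the rewrite author's own statement) =====
-- stated objective: simpler
-- what changed: Replaces the repeated index/slice/rebuild loop over the present props (re-scanning and reconstructing the whole list once per expandable prop) by one lookup table plus a single left-to-right pass over props with a seen-set, expanding the first occurrence of each expandable prop in place.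
import Mathlib
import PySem

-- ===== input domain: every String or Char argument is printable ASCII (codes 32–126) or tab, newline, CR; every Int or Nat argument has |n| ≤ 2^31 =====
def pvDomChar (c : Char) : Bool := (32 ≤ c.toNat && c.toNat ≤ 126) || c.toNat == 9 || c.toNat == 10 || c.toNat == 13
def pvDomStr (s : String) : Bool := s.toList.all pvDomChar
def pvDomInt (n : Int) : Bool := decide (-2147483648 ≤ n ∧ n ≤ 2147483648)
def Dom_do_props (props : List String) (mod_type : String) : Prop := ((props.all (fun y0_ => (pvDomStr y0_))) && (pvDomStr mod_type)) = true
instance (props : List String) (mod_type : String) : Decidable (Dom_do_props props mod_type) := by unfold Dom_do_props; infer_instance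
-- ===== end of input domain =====

-- B replaces A's repeated index/slice/rebuild loop by one lookup table plus a single
-- left-to-right pass with a seen-set (objective: simpler, one traversal of props).

-- ===== PORT A =====
-- the module-level dict array_props
def apDict : PySem.Dict String Int := PySem.Dict.ofList
  [("MIRROR_use_axis",3),("MIRROR_use_bisect_axis",3),("MIRROR_use_bisect_flip_axis",3),
   ("ARRAY_constant_offset_displace",3),("ARRAY_relative_offset_displace",3),
   ("SIMPLE_DEFORM_limits",2),("NORMAL_EDIT_offset",3),("UV_WARP_center",2),
   ("UV_WARP_offset",2),("UV_WARP_scale",2),("HOOK_center",2)]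

-- one iteration of A's 'for p in props_present' loop (at the loop head 'array' and 'props'
-- are the same list, so a single state suffices)
def pvAstep (mod_type : String) (array : List String) (p : String) : List String :=
  match PySem.List.index? array p with
  | none => array            -- list.index raises ValueError here; outside Pre_
  | some pos =>
    let head := PySem.List.slice array none (some (pos : Int))            -- props[:pos]
    let rem_array := PySem.List.slice array (some ((pos : Int) + 1)) none -- props[pos+1:]
    match apDict.get? (mod_type ++ "_" ++ p) with
    | none => array          -- dict lookup raises KeyError here; outside Pre_
    | some c =>
      ((PySem.List.pyRange 0 c 1).foldl
        (fun a i => a ++ [p ++ "[" ++ PySem.Int.toStr i ++ "]"]) head) ++ rem_array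

def do_props (props : List String) (mod_type : String) : List String :=
  let props_present :=
    ((apDict.keys.map (fun a => PySem.Str.replace a (mod_type ++ "_") "")).filter
      (fun p => props.contains p))
  props_present.foldl (pvAstep mod_type) props

-- ===== PORT B =====
-- 'expand = {}; for key in array_props: …'
def pvBuildStep (props : List String) (mod_type : String) (d : PySem.Dict String Int)
    (k : String) : PySem.Dict String Int :=
  let p := PySem.Str.replace k (mod_type ++ "_") ""
  if props.contains p then
    match apDict.get? (mod_type ++ "_" ++ p) with
    | none => d              -- dict lookup raises KeyError here; outside Pre_
    | some c => d.insert p c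
  else d

def pvBuildExpand (props : List String) (mod_type : String) : PySem.Dict String Int :=
  apDict.keys.foldl (pvBuildStep props mod_type) PySem.Dict.empty

-- one iteration of B's single pass (state = (seen, out))
def pvBstep (expand : PySem.Dict String Int) (st : PySem.Set String × List String)
    (item : String) : PySem.Set String × List String :=
  match expand.get? item with
  | some c =>
    if PySem.Set.contains st.1 item then (st.1, st.2 ++ [item])
    else (PySem.Set.add st.1 item,
          st.2 ++ (PySem.List.pyRange 0 c 1).map (fun i => item ++ "[" ++ PySem.Int.toStr i ++ "]"))
  | none => (st.1, st.2 ++ [item])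

def do_props_alt (props : List String) (mod_type : String) : List String :=
  (props.foldl (pvBstep (pvBuildExpand props mod_type)) (PySem.Set.empty, [])).2

-- ===== PRECONDITION & SPEC =====
-- Pre_ excludes exactly the inputs on which A raises: a stripped key name that is in props but
-- whose reconstructed key mod_type+"_"+p is not in array_props makes A (and B) raise KeyError;
-- the Nodup conjunct (duplicate stripped names among the present props) is implied by the
-- lookup conjunct for this fixed key table and is stated explicitly only for the proof.
def Pre_do_props (props : List String) (mod_type : String) : Prop :=
  ((apDict.keys.map (fun a => PySem.Str.replace a (mod_type ++ "_") "")).filter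
      (fun p => props.contains p)).Nodup ∧
  ∀ p ∈ ((apDict.keys.map (fun a => PySem.Str.replace a (mod_type ++ "_") "")).filter
      (fun p => props.contains p)),
    (apDict.get? (mod_type ++ "_" ++ p)).isSome

instance (props : List String) (mod_type : String) : Decidable (Pre_do_props props mod_type) := by
  unfold Pre_do_props; infer_instance

def pvWitness_do_props : List String × String := (["use_axis", "limits"], "MIRROR")

def Spec_do_props (props : List String) (mod_type : String) (out : List String) : Prop := out = do_props_alt props mod_type
instance (props : List String) (mod_type : String) (out : List String) : Decidable (Spec_do_props props mod_type out) := by unfold Spec_do_props; infer_instance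

-- ===== CLAIM (what is proved, stated in full; the proofs are below) =====
def Claim_equal_do_props : Prop := ∀ (props : List String) (mod_type : String), Dom_do_props props mod_type → Pre_do_props props mod_type → Spec_do_props props mod_type (do_props props mod_type)

-- ===== LEMMAS AND PROOFS =====

-- the expansion entries f'{p}[{i}]' for i in range(c)
def pvExp (p : String) (c : Int) : List String :=
  (PySem.List.pyRange 0 c 1).map (fun i => p ++ "[" ++ PySem.Int.toStr i ++ "]")

-- replace the FIRST occurrence of p in a list by its expansion
def pvEF (p : String) (c : Int) : List String → List String
  | [] => []
  | x :: xs => if x = p then pvExp p c ++ xs else x :: pvEF p c xs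

-- the index count A looks up for p (total form; inside Pre_ the lookup is some)
def pvC (mod_type p : String) : Int := (apDict.get? (mod_type ++ "_" ++ p)).getD 0

-- sequential first-occurrence expansion over a list qs of prop names
def pvF (mt : String) (qs : List String) (xs : List String) : List String :=
  qs.foldl (fun a p => pvEF p (pvC mt p) a) xs

-- recursion form of B's single pass
def pvGo (expand : PySem.Dict String Int) (seen : PySem.Set String) : List String → List String
  | [] => []
  | x :: xs =>
    match expand.get? x with
    | some c =>
      if PySem.Set.contains seen x then x :: pvGo expand seen xs
      else pvExp x c ++ pvGo expand (PySem.Set.add seen x) xs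
    | none => x :: pvGo expand seen xs

theorem pvEF_eq_take_drop (p : String) (c : Int) (xs : List String) (k : Nat)
    (h : PySem.List.index? xs p = some k) :
    pvEF p c xs = xs.take k ++ pvExp p c ++ xs.drop (k + 1) := by
  induction xs generalizing k with
  | nil => simp [PySem.List.index?] at h
  | cons x xs ih =>
    by_cases hx : x = p
    · subst hx
      rw [PySem.List.index?_cons_self] at h
      cases h
      simp [pvEF]
    · rw [PySem.List.index?_cons_of_ne xs hx] at h
      rcases Option.map_eq_some_iff.mp h with ⟨k', hk', rfl⟩
      simp [pvEF, hx, ih k' hk']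

theorem pvAstep_eq_pvEF (mt : String) (xs : List String) (p : String) (c : Int)
    (hp : p ∈ xs) (hc : apDict.get? (mt ++ "_" ++ p) = some c) :
    pvAstep mt xs p = pvEF p c xs := by
  obtain ⟨k, hk⟩ := Option.isSome_iff_exists.mp ((PySem.List.index?_isSome_iff xs p).2 hp)
  rw [pvEF_eq_take_drop p c xs k hk]
  unfold pvAstep
  rw [hk, hc]
  have h1 : ((k : Int) + 1) = ((k + 1 : Nat) : Int) := by push_cast; ring
  simp only [h1, PySem.List.slice_to_natCast, PySem.List.slice_from_natCast,
    PySem.List.foldl_append_singleton_eq_map]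
  simp [pvExp]

theorem mem_pvEF (p q : String) (c : Int) (xs : List String)
    (hne : q ≠ p) (hq : q ∈ xs) : q ∈ pvEF p c xs := by
  induction xs with
  | nil => simp at hq
  | cons x xs ih =>
    rcases List.mem_cons.mp hq with rfl | hq'
    · by_cases hx : q = p
      · exact absurd hx hne
      · simp [pvEF, hx]
    · by_cases hx : x = p
      · subst hx
        simp [pvEF, hq']
      · simp only [pvEF, if_neg hx]
        exact List.mem_cons_of_mem _ (ih hq')

-- A's fold over props_present equals sequential first-occurrence expansion
theorem pvA_fold_eq_pvF (mt : String) (qs xs : List String)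
    (hsome : ∀ p ∈ qs, (apDict.get? (mt ++ "_" ++ p)).isSome)
    (hnd : qs.Nodup) (hmem : ∀ p ∈ qs, p ∈ xs) :
    qs.foldl (pvAstep mt) xs = pvF mt qs xs := by
  induction qs generalizing xs with
  | nil => rfl
  | cons p qs ih =>
    obtain ⟨c, hc⟩ := Option.isSome_iff_exists.mp (hsome p (by simp))
    have hstep : pvAstep mt xs p = pvEF p (pvC mt p) xs := by
      rw [pvAstep_eq_pvEF mt xs p c (hmem p (by simp)) hc]
      simp [pvC, hc]
    have hnd' := (List.nodup_cons.mp hnd)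
    simp only [List.foldl_cons, hstep, pvF]
    refine ih (pvEF p (pvC mt p) xs) (fun q hq => hsome q (by simp [hq])) hnd'.2 ?_
    intro q hq
    have hqp : q ≠ p := fun h => hnd'.1 (h ▸ hq)
    exact mem_pvEF p q (pvC mt p) xs hqp (hmem q (by simp [hq]))

-- bracket-freeness: inside Pre_ every present prop name is a suffix of one of the 11
-- literal keys, hence contains no '['
def pvBF (q : String) : Prop := '[' ∉ q.toList

theorem pvBF_of_some (mt p : String) (h : (apDict.get? (mt ++ "_" ++ p)).isSome) : pvBF p := by
  have hk : (mt ++ "_" ++ p) ∈ apDict.keys := by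
    by_contra hk
    rw [← PySem.Dict.get?_eq_none_iff_not_mem_keys] at hk
    simp [hk] at h
  intro hmem
  have hin : '[' ∈ (mt ++ "_" ++ p).toList := by
    simp [String.toList_append, hmem]
  have hkeys : apDict.keys = ["MIRROR_use_axis","MIRROR_use_bisect_axis","MIRROR_use_bisect_flip_axis","ARRAY_constant_offset_displace","ARRAY_relative_offset_displace","SIMPLE_DEFORM_limits","NORMAL_EDIT_offset","UV_WARP_center","UV_WARP_offset","UV_WARP_scale","HOOK_center"] := by decide
  rw [hkeys] at hk
  simp only [List.mem_cons, List.not_mem_nil, or_false] at hk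
  rcases hk with h|h|h|h|h|h|h|h|h|h|h <;> rw [h] at hin <;> revert hin <;> decide

theorem pvExp_ne (p q : String) (hq : pvBF q) (e : String) (he : e ∈ pvExp p c) : e ≠ q := by
  rcases List.mem_map.mp he with ⟨i, _, rfl⟩
  intro h
  apply hq
  rw [← h]
  simp [String.toList_append]

theorem pvEF_append_left (p : String) (c : Int) (l ys : List String)
    (hl : ∀ e ∈ l, e ≠ p) : pvEF p c (l ++ ys) = l ++ pvEF p c ys := by
  induction l with
  | nil => rfl
  | cons x l ih =>
    simp only [List.cons_append, pvEF, if_neg (hl x (by simp)), ih (fun e he => hl e (by simp [he]))]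

theorem pvF_nil (mt : String) (qs : List String) : pvF mt qs [] = [] := by
  induction qs with
  | nil => rfl
  | cons p qs ih => simpa [pvF, pvEF] using ih

theorem pvF_append_exp (mt x : String) (c : Int) (qs xs : List String)
    (hbf : ∀ q ∈ qs, pvBF q) :
    pvF mt qs (pvExp x c ++ xs) = pvExp x c ++ pvF mt qs xs := by
  induction qs generalizing xs with
  | nil => rfl
  | cons q qs ih =>
    simp only [pvF, List.foldl_cons]
    rw [pvEF_append_left _ _ _ _ (fun e he => pvExp_ne x q (hbf q (by simp)) e he)]
    exact ih _ (fun q hq => hbf q (by simp [hq]))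

theorem pvF_cons_not_mem (mt x : String) (qs xs : List String) (hx : x ∉ qs) :
    pvF mt qs (x :: xs) = x :: pvF mt qs xs := by
  induction qs generalizing xs with
  | nil => rfl
  | cons q qs ih =>
    have hxq : x ≠ q := fun h => hx (by simp [h])
    simp only [pvF, List.foldl_cons, pvEF, if_neg hxq]
    exact ih _ (fun h => hx (by simp [h]))

theorem pvF_cons_mem (mt x : String) (qs xs : List String) (hnd : qs.Nodup) (hx : x ∈ qs)
    (hbf : ∀ q ∈ qs, pvBF q) :
    pvF mt qs (x :: xs) = pvExp x (pvC mt x) ++ pvF mt (qs.filter (fun q => q ≠ x)) xs := by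
  induction qs generalizing xs with
  | nil => simp at hx
  | cons q qs ih =>
    have hnd' := List.nodup_cons.mp hnd
    simp only [pvF, List.foldl_cons]
    by_cases hq : q = x
    · subst hq
      have hfilter : qs.filter (fun p => decide (p ≠ q)) = qs :=
        List.filter_eq_self.mpr (fun a ha => by
          simp only [ne_eq, decide_eq_true_eq]
          exact fun h => hnd'.1 (h ▸ ha))
      have h1 : pvEF q (pvC mt q) (q :: xs) = pvExp q (pvC mt q) ++ xs := by
        simp [pvEF]
      rw [h1, List.filter_cons_of_neg (by simp), hfilter]
      exact pvF_append_exp mt q (pvC mt q) qs xs (fun p hp => hbf p (List.mem_cons_of_mem _ hp))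
    · have hx' : x ∈ qs := by
        rcases List.mem_cons.mp hx with h | h
        · exact absurd h.symm hq
        · exact h
      have hxq : x ≠ q := fun h => hq h.symm
      have h1 : pvEF q (pvC mt q) (x :: xs) = x :: pvEF q (pvC mt q) xs := by
        simp [pvEF, hxq]
      rw [h1, List.filter_cons_of_pos (by simp [hq])]
      simpa only [pvF, List.foldl_cons] using
        ih (pvEF q (pvC mt q) xs) hnd'.2 hx' (fun p hp => hbf p (List.mem_cons_of_mem _ hp))

-- characterisation of B's expand dict
theorem pvBuildExpand_get?_aux (props : List String) (mt : String) (l : List String)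
    (d : PySem.Dict String Int) (x : String)
    (hsome : ∀ p ∈ (l.map (fun a => PySem.Str.replace a (mt ++ "_") "")).filter
        (fun p => props.contains p), (apDict.get? (mt ++ "_" ++ p)).isSome) :
    (l.foldl (pvBuildStep props mt) d).get? x =
    if x ∈ (l.map (fun a => PySem.Str.replace a (mt ++ "_") "")).filter
        (fun p => props.contains p) then some (pvC mt x) else d.get? x := by
  induction l generalizing d with
  | nil => simp
  | cons k l ih =>
    have hfc : ((k :: l).map (fun a => PySem.Str.replace a (mt ++ "_") "")).filter
          (fun p => props.contains p)
        = if props.contains (PySem.Str.replace k (mt ++ "_") "") then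
            PySem.Str.replace k (mt ++ "_") ""
              :: (l.map (fun a => PySem.Str.replace a (mt ++ "_") "")).filter
                  (fun p => props.contains p)
          else (l.map (fun a => PySem.Str.replace a (mt ++ "_") "")).filter
                  (fun p => props.contains p) := by
      simp [List.filter_cons]
    by_cases hc : props.contains (PySem.Str.replace k (mt ++ "_") "") = true
    · rw [hfc, if_pos hc] at hsome ⊢
      obtain ⟨c, hcv⟩ := Option.isSome_iff_exists.mp (hsome _ (List.mem_cons_self))
      have hstep : pvBuildStep props mt d k = d.insert (PySem.Str.replace k (mt ++ "_") "") c := by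
        simp only [pvBuildStep]
        rw [if_pos hc, hcv]
      rw [List.foldl_cons, hstep,
        ih (d.insert (PySem.Str.replace k (mt ++ "_") "") c)
          (fun q hq => hsome q (List.mem_cons_of_mem _ hq))]
      by_cases hx : x = PySem.Str.replace k (mt ++ "_") ""
      · subst hx
        simp [PySem.Dict.get?_insert_self, pvC, hcv]
      · rw [PySem.Dict.get?_insert_of_ne d c hx]
        simp [List.mem_cons, hx]
    · rw [hfc, if_neg hc] at hsome ⊢
      have hstep : pvBuildStep props mt d k = d := by
        simp only [pvBuildStep]
        rw [if_neg hc]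
      rw [List.foldl_cons, hstep, ih d hsome]

-- B's fold is pvGo
theorem pvB_fold_eq_pvGo (expand : PySem.Dict String Int) (xs : List String)
    (seen : PySem.Set String) (out : List String) :
    (xs.foldl (pvBstep expand) (seen, out)).2 = out ++ pvGo expand seen xs := by
  induction xs generalizing seen out with
  | nil => simp [pvGo]
  | cons x xs ih =>
    simp only [List.foldl_cons, pvBstep, pvGo]
    cases hg : expand.get? x with
    | none => simp [ih, List.append_assoc]
    | some c =>
      by_cases hs : x ∈ seen
      · simp [hs, ih, List.append_assoc]
      · simp [hs, ih, List.append_assoc, pvExp]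

-- the single pass equals sequential first-occurrence expansion over the not-yet-seen props
theorem pvGo_eq_pvF (props : List String) (mt : String)
    (ps : List String)
    (hps : ps = (apDict.keys.map (fun a => PySem.Str.replace a (mt ++ "_") "")).filter
      (fun p => props.contains p))
    (hnd : ps.Nodup)
    (hsome : ∀ p ∈ ps, (apDict.get? (mt ++ "_" ++ p)).isSome)
    (xs : List String) (seen : PySem.Set String) :
    pvGo (pvBuildExpand props mt) seen xs =
      pvF mt (ps.filter (fun p => ¬ PySem.Set.contains seen p)) xs := by
  have hget : ∀ x, (pvBuildExpand props mt).get? x =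
      if x ∈ ps then some (pvC mt x) else none := by
    intro x
    unfold pvBuildExpand
    rw [pvBuildExpand_get?_aux props mt apDict.keys PySem.Dict.empty x (hps ▸ hsome)]
    rw [← hps]
    rfl
  have hbf : ∀ q ∈ ps, pvBF q := fun q hq => pvBF_of_some mt q (hsome q hq)
  induction xs generalizing seen with
  | nil => rw [pvF_nil]; rfl
  | cons x xs ih =>
    simp only [pvGo]
    rw [hget x]
    by_cases hx : x ∈ ps
    · simp only [if_pos hx]
      by_cases hs : x ∈ seen
      · have hxq : x ∉ ps.filter (fun p => ¬ PySem.Set.contains seen p) := by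
          intro hmem
          exact (of_decide_eq_true (List.mem_filter.mp hmem).2)
            ((PySem.Set.contains_iff seen x).mpr hs)
        rw [if_pos ((PySem.Set.contains_iff seen x).mpr hs), ih seen,
          pvF_cons_not_mem mt x _ xs hxq]
      · have hcs : ¬ (PySem.Set.contains seen x = true) :=
          fun h => hs ((PySem.Set.contains_iff seen x).mp h)
        rw [if_neg hcs, ih (PySem.Set.add seen x)]
        have hxq : x ∈ ps.filter (fun p => ¬ PySem.Set.contains seen p) :=
          List.mem_filter.mpr ⟨hx, decide_eq_true hcs⟩
        rw [pvF_cons_mem mt x _ xs (hnd.filter _) hxq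
          (fun q hq => hbf q (List.mem_filter.mp hq).1)]
        have hfil : (ps.filter (fun p => ¬ PySem.Set.contains seen p)).filter (fun q => q ≠ x)
            = ps.filter (fun p => ¬ PySem.Set.contains (PySem.Set.add seen x) p) := by
          rw [List.filter_filter]
          apply List.filter_congr
          intro q _
          simp only [PySem.Set.contains_iff, PySem.Set.mem_add]
          by_cases h1 : q = x <;> by_cases h2 : q ∈ seen <;> simp [h1, h2]
        rw [hfil]
    · simp only [if_neg hx]
      have hxq : x ∉ ps.filter (fun p => ¬ PySem.Set.contains seen p) :=
        fun hmem => hx (List.mem_filter.mp hmem).1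
      rw [ih seen, pvF_cons_not_mem mt x _ xs hxq]

-- ===== VERDICT (by name: the statement is the Claim_ definition above) =====
theorem do_props_spec : Claim_equal_do_props := by
  intro props mt _ hpre
  obtain ⟨hnd, hsome⟩ := hpre
  unfold Spec_do_props do_props do_props_alt
  set ps := (apDict.keys.map (fun a => PySem.Str.replace a (mt ++ "_") "")).filter
    (fun p => props.contains p) with hps
  have hmem : ∀ p ∈ ps, p ∈ props := by
    intro p hp
    have := (List.mem_filter.mp (hps ▸ hp)).2
    exact (List.contains_iff_mem).mp (by simpa using this)
  rw [pvA_fold_eq_pvF mt ps props hsome hnd hmem]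
  rw [pvB_fold_eq_pvGo]
  rw [pvGo_eq_pvF props mt ps hps hnd hsome props PySem.Set.empty]
  rw [List.nil_append]
  congr 1
  symm
  exact List.filter_eq_self.mpr (fun a _ => by
    simp [PySem.Set.empty])
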